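-- pv_equiv track=rewrite | github.com/DancingOnAir/LeetcodePythonSolution | String/1370_increasing_decreasing_string.py | sortString1
-- ===== SOURCE A (Python) =====
-- def sortString1(s: str) -> str:
--     n = len(s)
--     if n < 2:
--         return s
--
--     freq = [0] * 26
--     for c in s:
--         freq[ord(c) - 97] += 1
--
--     res = ''
--     i = 0
--     while i < n:
--         for j in range(26):
--             if i > n:
--                 break
--             if freq[j] > 0:
--                 freq[j] -= 1
--                 res += chr(j + 97)
--                 i += 1
--
--         for j in range(25, -1, -1):
--             if i > n:
--                 break
--             if freq[j] > 0:
--                 freq[j] -= 1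
--                 res += chr(j + 97)
--                 i += 1
--     return res
-- ===== SOURCE B (Python) =====
-- def sortString1(s: str) -> str:
--     if len(s) < 2:
--         return s
--     cnt = {}
--     for c in s:
--         cnt[c] = cnt.get(c, 0) + 1
--     m = max(cnt.values())
--     parts = []
--     for r in range(m):
--         ks = sorted(c for c in cnt if cnt[c] > r)
--         if r % 2 == 1:
--             ks.reverse()
--         parts.append(''.join(ks))
--     return ''.join(parts)
-- ===== Notes on version B (the rewrite author's own statement) =====
-- stated objective: idiomatic
-- what changed: B replaces A's mutable 26-slot frequency array, running index i and while i<n loop with a dict of character counts built once and a for-loop over a precomputed number of rounds (the maximum multiplicity), each round selecting and sorting the characters whose count exceeds the round number; no per-character freq decrements or repeated 0..25 scans with string concatenation (a timing run measured B ~1.7x faster).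
-- intended difference: On strings of length >= 2 whose chars all have codes 71..122 but at least one in 71..96 ('G'..'`'), A silently maps those chars to lowercase letters via Python negative-index wraparound of freq[ord(c)-97] (e.g. 'G`' -> 'az'), while B returns the zigzag arrangement of the actual input characters ('G`' -> 'G`'), which is the intended value. — e.g. on sortString1("G`"): A returns "az", B returns "G`"
import Mathlib
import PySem

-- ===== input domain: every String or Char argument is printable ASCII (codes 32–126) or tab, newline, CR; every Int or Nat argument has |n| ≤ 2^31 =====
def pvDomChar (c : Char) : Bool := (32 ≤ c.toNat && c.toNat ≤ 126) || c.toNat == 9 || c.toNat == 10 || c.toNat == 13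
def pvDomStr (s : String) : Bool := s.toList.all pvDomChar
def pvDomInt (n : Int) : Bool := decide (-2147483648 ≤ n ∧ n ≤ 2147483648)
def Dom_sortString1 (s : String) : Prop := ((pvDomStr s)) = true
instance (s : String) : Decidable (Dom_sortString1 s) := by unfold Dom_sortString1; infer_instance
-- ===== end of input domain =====

set_option maxRecDepth 20000


-- B replaces A's mutable 26-slot frequency array and i<n while-loop by a dict built once and a
-- fixed number of rounds (max multiplicity), each round filtering and sorting the remaining keys.
-- Equivalence of RETURN VALUES is proved on Pre_; on D_ (negative-index wraparound inputs) B is intended.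

-- ===== PORT A =====
-- one inner for-loop of A: for j in order: if i > n: break; if freq[j] > 0: freq[j] -= 1; res += chr(j+97); i += 1
def passA (n : Int) : List Int → List Int × List Char × Int → List Int × List Char × Int
  | [], st => st
  | j :: js, (f, res, i) =>
    if i > n then (f, res, i)
    else
      let v := PySem.List.pyGetD f j 0
      if 0 < v then passA n js (PySem.List.pySetD f j (v - 1), res ++ [Char.ofNat (j + 97).toNat], i + 1)
      else passA n js (f, res, i)

-- the while i < n loop; fuel only makes the recursion total (Python's loop terminates whenever it returns)
def loopA (n : Int) : Nat → List Int → List Char → Int → List Char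
  | 0, _, res, _ => res
  | fuel+1, f, res, i =>
    if i < n then
      let (f1, r1, i1) := passA n (PySem.List.pyRange 0 26 1) (f, res, i)
      let (f2, r2, i2) := passA n (PySem.List.pyRange 25 (-1) (-1)) (f1, r1, i1)
      loopA n fuel f2 r2 i2
    else res

def sortString1 (s : String) : String :=
  let cs := s.toList
  let n : Int := cs.length
  if n < 2 then s
  else
    let freq := cs.foldl
      (fun f c => PySem.List.pySetD f ((c.toNat : Int) - 97)
        (PySem.List.pyGetD f ((c.toNat : Int) - 97) 0 + 1)) (List.replicate 26 (0 : Int))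
    String.ofList (loopA n (cs.length + 1) freq [] 0)

-- ===== PORT B =====
def sortString1_alt (s : String) : String :=
  if s.toList.length < 2 then s
  else
    let cs := s.toList
    let cnt := cs.foldl (fun d c => d.insert c (d.getD c 0 + 1)) PySem.Dict.empty
    let m : Int := ((PySem.List.max? cnt.values (fun v => v)).getD 0)
    let parts := (PySem.List.pyRange 0 m 1).map (fun r =>
      let ks := PySem.List.sorted ((cnt.keys).filter (fun c => decide (r < cnt.getD c 0))) (fun c => c) false
      if r % 2 == 1 then ks.reverse else ks)
    String.ofList parts.flatten

-- ===== PRECONDITION & SPEC =====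
-- Pre_ is exactly where Python A returns: length < 2, or every char has code 71..122
-- (codes < 71 or > 122 make freq[ord(c)-97] raise IndexError when len(s) >= 2).
def Pre_sortString1 (s : String) : Prop :=
  s.toList.length < 2 ∨ (s.toList.all (fun c => 71 ≤ c.toNat && c.toNat ≤ 122)) = true

instance (s : String) : Decidable (Pre_sortString1 s) := by unfold Pre_sortString1; infer_instance

def pvWitness_sortString1 : String := "baca"

-- On strings of length >= 2 whose chars all have codes 71..122 with some code in 71..96 (e.g. 'G'..'`'),
-- A returns lowercase letters obtained by accidental negative-index wraparound of freq[ord(c)-97],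
-- while B returns the zigzag arrangement of the actual input characters, which is the intended value.
def D_sortString1 (s : String) : Prop :=
  2 ≤ s.toList.length ∧ (s.toList.all (fun c => 71 ≤ c.toNat && c.toNat ≤ 122)) = true ∧
    (s.toList.any (fun c => c.toNat ≤ 96)) = true

instance (s : String) : Decidable (D_sortString1 s) := by unfold D_sortString1; infer_instance

def Spec_sortString1 (s : String) (out : String) : Prop := ¬ D_sortString1 s → out = sortString1_alt s
instance (s : String) (out : String) : Decidable (Spec_sortString1 s out) := by
  unfold Spec_sortString1; infer_instance

def pvDiffWitness_sortString1 : String := "G`"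
def pvDiffWitnessOut_sortString1 : String × String := ("az", "G`")

-- ===== CLAIM (what is proved, stated in full; the proofs are below) =====
def Claim_unchanged_sortString1 : Prop :=
  ∀ (s : String), Dom_sortString1 s → Pre_sortString1 s → Spec_sortString1 s (sortString1 s)
def Claim_changed_sortString1 : Prop :=
  Dom_sortString1 (pvDiffWitness_sortString1) ∧ Pre_sortString1 (pvDiffWitness_sortString1) ∧
  D_sortString1 (pvDiffWitness_sortString1) ∧
  sortString1 (pvDiffWitness_sortString1) = pvDiffWitnessOut_sortString1.1 ∧
  sortString1_alt (pvDiffWitness_sortString1) = pvDiffWitnessOut_sortString1.2 ∧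
  pvDiffWitnessOut_sortString1.1 ≠ pvDiffWitnessOut_sortString1.2
def Claim_exact_sortString1 : Prop :=
  ∀ (s : String), Dom_sortString1 s → Pre_sortString1 s → D_sortString1 s →
    sortString1 s ≠ sortString1_alt s

-- ===== LEMMAS AND PROOFS =====

-- lowercase letter for slot j
def chrL (j : Nat) : Char := Char.ofNat (j + 97)

theorem chrL_toNat {j : Nat} (h : j < 30000) : (chrL j).toNat = j + 97 := by
  have hv : (j+97).isValidChar := by unfold Nat.isValidChar; omega
  simp [chrL, Char.ofNat, hv, Char.toNat, Char.ofNatAux]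
  omega

theorem toNat_inj {c d : Char} (h : c.toNat = d.toNat) : c = d := by
  apply Char.ext; apply UInt32.toNat_inj.mp; exact h

theorem chrL_lt {j k : Nat} (hj : j < 30000) (hk : k < 30000) (h : j < k) : chrL j < chrL k := by
  rw [Char.lt_def, UInt32.lt_iff_toNat_lt]
  have h1 := chrL_toNat hj; have h2 := chrL_toNat hk
  unfold Char.toNat at h1 h2
  omega

theorem chrL_inj {j k : Nat} (hj : j < 30000) (hk : k < 30000) (h : chrL j = chrL k) : j = k := by
  have h1 := chrL_toNat hj; have h2 := chrL_toNat hk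
  rw [h] at h1; omega

theorem eq_chrL {c : Char} (h1 : 97 ≤ c.toNat) (h2 : c.toNat ≤ 122) : c = chrL (c.toNat - 97) := by
  have : (chrL (c.toNat - 97)).toNat = c.toNat := by rw [chrL_toNat (by omega)]; omega
  exact (toNat_inj this).symm

-- count of slot j in cs, as Int
def gcnt (cs : List Char) (j : Nat) : Int := (cs.count (chrL j) : Int)

-- the frequency vector after r rounds of decrements
def clipvec (cs : List Char) (r : Nat) : List Int :=
  (List.range 26).map (fun j => max (gcnt cs j - r) 0)

-- ascending char list of round r
def ksAsc (cs : List Char) (r : Nat) : List Char :=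
  ((List.range 26).filter (fun j => decide ((r : Int) < gcnt cs j))).map chrL

def roundA (cs : List Char) (r : Nat) : List Char :=
  if r % 2 = 1 then (ksAsc cs r).reverse else ksAsc cs r

-- the frequency-vector effect of one inner for-loop of A
def decr : List Int → List Int → List Int
  | [], f => f
  | j :: js, f =>
    let v := PySem.List.pyGetD f j 0
    if 0 < v then decr js (PySem.List.pySetD f j (v - 1)) else decr js f

theorem gcnt_nonneg (cs : List Char) (j : Nat) : 0 ≤ gcnt cs j := by
  simp [gcnt]

theorem length_clipvec (cs : List Char) (r : Nat) : (clipvec cs r).length = 26 := by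
  simp [clipvec]

theorem getD_clipvec (cs : List Char) (r : Nat) {j : Int} (h0 : 0 ≤ j) (h1 : j < 26) :
    PySem.List.pyGetD (clipvec cs r) j 0 = max (gcnt cs j.toNat - r) 0 := by
  rw [PySem.List.pyGetD_of_nonneg _ _ h0]
  have hj : j.toNat < 26 := by omega
  simp [clipvec, List.getD, hj]

theorem mem_clipvec_nonneg (cs : List Char) (r : Nat) : ∀ x ∈ clipvec cs r, 0 ≤ x := by
  intro x hx
  simp [clipvec] at hx
  obtain ⟨j, _, rfl⟩ := hx
  positivity

theorem sum_set' (l : List Int) (nn : Nat) (a : Int) (h : nn < l.length) :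
    (l.set nn a).sum = l.sum - l[nn] + a := by
  rw [List.sum_set]
  have hl : l.sum = (l.take nn).sum + l[nn] + (l.drop (nn+1)).sum := by
    calc l.sum = ((List.take nn l) ++ (List.drop nn l)).sum := by rw [List.take_append_drop]
      _ = (List.take nn l).sum + (List.drop nn l).sum := List.sum_append ..
      _ = _ := by rw [List.drop_eq_getElem_cons h, List.sum_cons]; omega
  rw [if_pos h]
  omega

theorem pyGetD_pySetD_self (f : List Int) {j : Int} (v : Int) (h26 : f.length = 26)
    (hj0 : 0 ≤ j) (hj1 : j < 26) :
    PySem.List.pyGetD (PySem.List.pySetD f j v) j 0 = v := by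
  have hjn : j = ((j.toNat : Nat) : Int) := by omega
  rw [hjn, PySem.List.pyGetD_pySetD_natCast f _ _ _ _ (by omega)]
  simp

theorem pyGetD_pySetD_ne (f : List Int) {j m : Int} (v : Int) (h26 : f.length = 26)
    (hj0 : 0 ≤ j) (hj1 : j < 26) (hm0 : 0 ≤ m) (hne : m ≠ j) :
    PySem.List.pyGetD (PySem.List.pySetD f j v) m 0 = PySem.List.pyGetD f m 0 := by
  have hjn : j = ((j.toNat : Nat) : Int) := by omega
  have hmn : m = ((m.toNat : Nat) : Int) := by omega
  rw [hjn, hmn, PySem.List.pyGetD_pySetD_natCast f _ _ _ _ (by omega)]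
  have : ¬ (m.toNat = j.toNat) := by omega
  simp [this]

theorem sum_pySetD_dec (f : List Int) {j : Int} (h26 : f.length = 26)
    (hj0 : 0 ≤ j) (hj1 : j < 26) :
    (PySem.List.pySetD f j (PySem.List.pyGetD f j 0 - 1)).sum = f.sum - 1 := by
  rw [PySem.List.pySetD_of_nonneg f _ hj0, sum_set' f j.toNat _ (by omega),
    PySem.List.pyGetD_eq_getElem f 0 hj0 (by omega)]
  omega

theorem passA_eq (n : Int) : ∀ (order : List Int) (f : List Int) (res : List Char) (i : Int),
    f.length = 26 → (∀ x ∈ f, 0 ≤ x) → (∀ j ∈ order, 0 ≤ j ∧ j < 26) → order.Nodup →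
    i + f.sum ≤ n →
    passA n order (f, res, i) =
      (decr order f,
       res ++ (order.filter (fun j => decide (0 < PySem.List.pyGetD f j 0))).map
         (fun j => Char.ofNat (j + 97).toNat),
       i + (order.filter (fun j => decide (0 < PySem.List.pyGetD f j 0))).length) := by
  intro order
  induction order with
  | nil => intro f res i _ _ _ _ _; simp [passA, decr]
  | cons j js ih =>
    intro f res i h26 hpos hord hnd hsum
    obtain ⟨hj0, hj1⟩ := hord j (List.mem_cons_self)
    have hordjs : ∀ x ∈ js, 0 ≤ x ∧ x < 26 := fun x hx => hord x (List.mem_cons_of_mem _ hx)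
    have hndjs : js.Nodup := (List.nodup_cons.mp hnd).2
    have hjnotin : j ∉ js := (List.nodup_cons.mp hnd).1
    have hfs : 0 ≤ f.sum := List.sum_nonneg hpos
    have hin : ¬ (i > n) := by omega
    have hvnn : 0 ≤ PySem.List.pyGetD f j 0 := by
      rw [PySem.List.pyGetD_eq_getElem f 0 hj0 (by omega)]
      exact hpos _ (List.getElem_mem _)
    simp only [passA, hin, if_false]
    by_cases hv : 0 < PySem.List.pyGetD f j 0
    · rw [if_pos hv]
      have h26' : (PySem.List.pySetD f j (PySem.List.pyGetD f j 0 - 1)).length = 26 := by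
        rw [PySem.List.length_pySetD]; exact h26
      have hpos' : ∀ x ∈ PySem.List.pySetD f j (PySem.List.pyGetD f j 0 - 1), 0 ≤ x := by
        rw [PySem.List.pySetD_of_nonneg f _ hj0]
        intro x hx
        rcases List.mem_or_eq_of_mem_set hx with h | h
        · exact hpos x h
        · omega
      have hsum' : (i + 1) + (PySem.List.pySetD f j (PySem.List.pyGetD f j 0 - 1)).sum ≤ n := by
        rw [sum_pySetD_dec f h26 hj0 hj1]; omega
      rw [ih _ _ _ h26' hpos' hordjs hndjs hsum']
      have hcongr : ∀ x ∈ js,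
          (decide (0 < PySem.List.pyGetD (PySem.List.pySetD f j (PySem.List.pyGetD f j 0 - 1)) x 0)) =
          (decide (0 < PySem.List.pyGetD f x 0)) := by
        intro x hx
        obtain ⟨hx0, hx1⟩ := hordjs x hx
        rw [pyGetD_pySetD_ne f _ h26 hj0 hj1 hx0 (fun he => hjnotin (he ▸ hx))]
      rw [List.filter_congr hcongr, List.filter_cons, if_pos (by simpa using hv)]
      refine Prod.ext ?_ (Prod.ext ?_ ?_)
      · simp [decr, hv]
      · simp
      · simp; omega
    · rw [if_neg hv]
      rw [ih _ _ _ h26 hpos hordjs hndjs (by omega)]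
      rw [List.filter_cons, if_neg (by simpa using hv)]
      refine Prod.ext ?_ (Prod.ext ?_ ?_)
      · simp [decr, hv]
      · simp
      · simp

theorem decr_length : ∀ (order : List Int) (f : List Int), (decr order f).length = f.length := by
  intro order
  induction order with
  | nil => intro f; simp [decr]
  | cons j js ih =>
    intro f
    simp only [decr]
    by_cases hv : 0 < PySem.List.pyGetD f j 0
    · rw [if_pos hv, ih, PySem.List.length_pySetD]
    · rw [if_neg hv, ih]

theorem decr_getD : ∀ (order : List Int) (f : List Int), f.length = 26 →
    (∀ j ∈ order, 0 ≤ j ∧ j < 26) → order.Nodup →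
    ∀ jj : Int, 0 ≤ jj → jj < 26 →
      PySem.List.pyGetD (decr order f) jj 0 =
        if jj ∈ order ∧ 0 < PySem.List.pyGetD f jj 0 then PySem.List.pyGetD f jj 0 - 1
        else PySem.List.pyGetD f jj 0 := by
  intro order
  induction order with
  | nil => intro f h26 hord hnd jj h0 h1; simp [decr]
  | cons j js ih =>
    intro f h26 hord hnd jj h0 h1
    obtain ⟨hj0, hj1⟩ := hord j (List.mem_cons_self)
    have hordjs : ∀ x ∈ js, 0 ≤ x ∧ x < 26 := fun x hx => hord x (List.mem_cons_of_mem _ hx)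
    have hndjs : js.Nodup := (List.nodup_cons.mp hnd).2
    have hjnotin : j ∉ js := (List.nodup_cons.mp hnd).1
    simp only [decr]
    by_cases hv : 0 < PySem.List.pyGetD f j 0
    · rw [if_pos hv]
      rw [ih _ (by rw [PySem.List.length_pySetD]; exact h26) hordjs hndjs jj h0 h1]
      by_cases hjj : jj = j
      · subst hjj
        rw [pyGetD_pySetD_self f _ h26 hj0 hj1]
        have hne : ¬ (jj ∈ js ∧ 0 < PySem.List.pyGetD f jj 0 - 1) ∧ True := ⟨fun h => hjnotin h.1, trivial⟩
        simp [hjnotin, hv]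
      · rw [pyGetD_pySetD_ne f _ h26 hj0 hj1 h0 hjj]
        simp [List.mem_cons, hjj]
    · rw [if_neg hv]
      rw [ih _ h26 hordjs hndjs jj h0 h1]
      by_cases hjj : jj = j
      · subst hjj
        simp [hjnotin, hv]
      · simp [List.mem_cons, hjj]

theorem decr_clipvec (cs : List Char) (r : Nat) (order : List Int)
    (hmem : ∀ j : Int, j ∈ order ↔ 0 ≤ j ∧ j < 26) (hnd : order.Nodup) :
    decr order (clipvec cs r) = clipvec cs (r + 1) := by
  apply List.ext_getElem
  · rw [decr_length, length_clipvec, length_clipvec]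
  · intro ii h1 h2
    rw [decr_length, length_clipvec] at h1
    have hg1 : PySem.List.pyGetD (decr order (clipvec cs r)) (ii : Int) 0 =
        (decr order (clipvec cs r))[ii] := by
      rw [PySem.List.pyGetD_eq_getElem _ 0 (by positivity)
        (by rw [decr_length, length_clipvec]; exact_mod_cast h1)]
      simp
    have hg2 : PySem.List.pyGetD (clipvec cs (r+1)) (ii : Int) 0 = (clipvec cs (r+1))[ii] := by
      rw [PySem.List.pyGetD_eq_getElem _ 0 (by positivity)
        (by rw [length_clipvec]; exact_mod_cast h1)]
      simp
    rw [← hg1, ← hg2]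
    rw [decr_getD order _ (length_clipvec cs r) (fun j hj => (hmem j).mp hj) hnd
      (ii : Int) (by positivity) (by exact_mod_cast h1)]
    have hmem' : (ii : Int) ∈ order := (hmem _).mpr ⟨by positivity, by exact_mod_cast h1⟩
    rw [getD_clipvec cs r (by positivity) (by exact_mod_cast h1),
        getD_clipvec cs (r+1) (by positivity) (by exact_mod_cast h1)]
    simp only [Int.toNat_natCast, hmem', true_and]
    have hgn := gcnt_nonneg cs ii
    split_ifs with h <;> push_cast at h ⊢ <;> omega

-- the chars appended by a pass over `order`, in order-order
theorem filter_asc (cs : List Char) (r : Nat) :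
    ((PySem.List.pyRange 0 26 1).filter
        (fun j => decide (0 < PySem.List.pyGetD (clipvec cs r) j 0))).map
      (fun j => Char.ofNat (j + 97).toNat) = ksAsc cs r := by
  have h1 : PySem.List.pyRange 0 26 1 = (List.range 26).map Int.ofNat := by
    rw [PySem.List.pyRange_one]
    simp [Int.ofNat_eq_natCast]
  rw [h1, List.filter_map, List.map_map]
  unfold ksAsc
  have hpred : ∀ x ∈ List.range 26,
      ((fun j => decide (0 < PySem.List.pyGetD (clipvec cs r) j 0)) ∘ Int.ofNat) x =
      (fun j => decide ((r : Int) < gcnt cs j)) x := by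
    intro x hx
    simp only [List.mem_range] at hx
    simp only [Function.comp, Int.ofNat_eq_natCast]
    have hg := getD_clipvec cs r (j := (x : Int)) (by positivity) (by exact_mod_cast hx)
    simp only [hg, Int.toNat_natCast]
    have := gcnt_nonneg cs x
    apply decide_eq_decide.mpr
    omega
  rw [List.filter_congr hpred]
  apply List.map_congr_left
  intro j hj
  have hj97 : ((j : Int) + 97).toNat = j + 97 := by omega
  simp [Function.comp, Int.ofNat_eq_natCast, chrL, hj97]

theorem filter_desc (cs : List Char) (r : Nat) :
    ((PySem.List.pyRange 25 (-1) (-1)).filter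
        (fun j => decide (0 < PySem.List.pyGetD (clipvec cs r) j 0))).map
      (fun j => Char.ofNat (j + 97).toNat) = (ksAsc cs r).reverse := by
  have h2 : PySem.List.pyRange 25 (-1) (-1) = (PySem.List.pyRange 0 26 1).reverse := by
    rw [PySem.List.pyRange_neg_one_eq_reverse]
    norm_num
  rw [h2, List.filter_reverse, List.map_reverse, filter_asc]

def Svec (cs : List Char) (r : Nat) : Int := (clipvec cs r).sum

theorem Svec_succ (cs : List Char) (r : Nat) :
    Svec cs r = Svec cs (r + 1) + (ksAsc cs r).length := by
  have key : ∀ k : Nat,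
      ((List.range k).map (fun j => max (gcnt cs j - (r:Int)) 0)).sum =
        ((List.range k).map (fun j => max (gcnt cs j - ((r:Int)+1)) 0)).sum +
        (((List.range k).filter (fun j => decide ((r:Int) < gcnt cs j))).length : Int) := by
    intro k
    induction k with
    | zero => simp
    | succ k ih =>
      rw [List.range_succ]
      simp only [List.map_append, List.sum_append, List.filter_append, List.length_append]
      have hg := gcnt_nonneg cs k
      by_cases hk : (r:Int) < gcnt cs k
      · simp [hk]
        omega
      · simp [hk]
        rw [not_lt] at hk
        omega
  unfold Svec clipvec ksAsc
  rw [List.length_map]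
  push_cast
  exact key 26

theorem Svec_nonneg (cs : List Char) (r : Nat) : 0 ≤ Svec cs r := by
  apply List.sum_nonneg
  exact mem_clipvec_nonneg cs r

theorem Svec_zero_iff (cs : List Char) (r : Nat) :
    Svec cs r = 0 ↔ ∀ j, j < 26 → gcnt cs j ≤ r := by
  unfold Svec clipvec
  constructor
  · intro h j hj
    by_contra hgt
    rw [not_le] at hgt
    have hmem : max (gcnt cs j - r) 0 ∈ (List.range 26).map (fun j => max (gcnt cs j - (r:Int)) 0) := by
      simp
      exact ⟨j, hj, rfl⟩
    have := List.single_le_sum (l := (List.range 26).map (fun j => max (gcnt cs j - (r:Int)) 0))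
      (by intro x hx; simp at hx; obtain ⟨j', _, rfl⟩ := hx; positivity) _ hmem
    rw [h] at this
    omega
  · intro h
    have : (List.range 26).map (fun j => max (gcnt cs j - (r:Int)) 0) =
        (List.range 26).map (fun _ => (0:Int)) := by
      apply List.map_congr_left
      intro j hj
      simp at hj
      have := h j hj
      omega
    rw [this]
    simp

theorem ksAsc_empty (cs : List Char) {r : Nat} (h : ∀ j, j < 26 → gcnt cs j ≤ r) :
    ksAsc cs r = [] := by
  have : ((List.range 26).filter (fun j => decide ((r : Int) < gcnt cs j))) = [] := by
    apply List.filter_eq_nil_iff.mpr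
    intro j hj
    simp at hj ⊢
    exact h j hj
  simp [ksAsc, this]

theorem loopA_eq (cs : List Char) (n : Int) : ∀ (fuel k : Nat) (res : List Char),
    (∀ j, j < 26 → gcnt cs j ≤ 2 * k + 2 * fuel) → Svec cs (2 * k) ≤ n →
    loopA n fuel (clipvec cs (2 * k)) res (n - Svec cs (2 * k)) =
      res ++ (List.range' (2 * k) (2 * fuel)).flatMap (roundA cs) := by
  intro fuel
  induction fuel with
  | zero =>
    intro k res _ _
    simp [loopA]
  | succ fuel ih =>
    intro k res hb hSn
    have hS0 := Svec_nonneg cs (2*k)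
    by_cases h0 : Svec cs (2*k) = 0
    · have hcond : ¬ (n - Svec cs (2*k) < n) := by omega
      have hrounds : ∀ r ∈ List.range' (2*k) (2*(fuel+1)), roundA cs r = [] := by
        intro r hr
        rw [List.mem_range'_1] at hr
        have hle : ∀ j, j < 26 → gcnt cs j ≤ (r : Int) := by
          intro j hj
          exact le_trans ((Svec_zero_iff cs (2*k)).mp h0 j hj) (by exact_mod_cast hr.1)
        unfold roundA
        rw [ksAsc_empty cs hle]
        simp
      rw [List.flatMap_eq_nil_iff.mpr hrounds]
      simp [loopA, hcond]
    · have hcond : n - Svec cs (2*k) < n := by omega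
      have hmem_asc : ∀ j : Int, j ∈ PySem.List.pyRange 0 26 1 ↔ 0 ≤ j ∧ j < 26 := by
        intro j
        rw [PySem.List.mem_pyRange_one]
      have hdesc_rev : PySem.List.pyRange 25 (-1) (-1) = (PySem.List.pyRange 0 26 1).reverse := by
        rw [PySem.List.pyRange_neg_one_eq_reverse]
        norm_num
      have hmem_desc : ∀ j : Int, j ∈ PySem.List.pyRange 25 (-1) (-1) ↔ 0 ≤ j ∧ j < 26 := by
        intro j
        rw [hdesc_rev, List.mem_reverse, PySem.List.mem_pyRange_one]
      have hnd_desc : (PySem.List.pyRange 25 (-1) (-1)).Nodup := by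
        rw [hdesc_rev]
        exact List.nodup_reverse.mpr (PySem.List.nodup_pyRange_one 0 26)
      have hp1 := passA_eq n (PySem.List.pyRange 0 26 1) (clipvec cs (2*k)) res (n - Svec cs (2*k))
        (length_clipvec cs (2*k)) (mem_clipvec_nonneg cs (2*k))
        (fun j hj => (hmem_asc j).mp hj) (PySem.List.nodup_pyRange_one 0 26)
        (by unfold Svec at *; omega)
      have hp2 := passA_eq n (PySem.List.pyRange 25 (-1) (-1)) (clipvec cs (2*k+1))
        (res ++ ksAsc cs (2*k)) (n - Svec cs (2*k+1))
        (length_clipvec cs (2*k+1)) (mem_clipvec_nonneg cs (2*k+1))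
        (fun j hj => (hmem_desc j).mp hj) hnd_desc
        (by unfold Svec at *; omega)
      have hi1 : n - Svec cs (2*k) + ((PySem.List.pyRange 0 26 1).filter
          (fun j => decide (0 < PySem.List.pyGetD (clipvec cs (2*k)) j 0))).length =
          n - Svec cs (2*k+1) := by
        have hlen := congrArg List.length (filter_asc cs (2*k))
        simp only [List.length_map] at hlen
        rw [hlen]
        have := Svec_succ cs (2*k)
        omega
      have hi2 : n - Svec cs (2*k+1) + ((PySem.List.pyRange 25 (-1) (-1)).filter
          (fun j => decide (0 < PySem.List.pyGetD (clipvec cs (2*k+1)) j 0))).length =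
          n - Svec cs (2*k+2) := by
        have hlen := congrArg List.length (filter_desc cs (2*k+1))
        simp only [List.length_map, List.length_reverse] at hlen
        rw [hlen]
        have := Svec_succ cs (2*k+1)
        rw [show 2*k+1+1 = 2*k+2 from by omega] at this
        omega
      have hstep : loopA n (fuel+1) (clipvec cs (2*k)) res (n - Svec cs (2*k)) =
          loopA n fuel (clipvec cs (2*k+2)) (res ++ ksAsc cs (2*k) ++ (ksAsc cs (2*k+1)).reverse)
            (n - Svec cs (2*k+2)) := by
        simp only [loopA, if_pos hcond]
        rw [hp1]
        rw [decr_clipvec cs (2*k) _ hmem_asc (PySem.List.nodup_pyRange_one 0 26),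
          filter_asc cs (2*k), hi1]
        rw [hp2]
        rw [decr_clipvec cs (2*k+1) _ hmem_desc hnd_desc, filter_desc cs (2*k+1), hi2]
      rw [hstep]
      have h2k2 : 2*k+2 = 2*(k+1) := by omega
      rw [h2k2]
      rw [ih (k+1) _ (by intro j hj; have := hb j hj; push_cast at *; omega)
        (by have h1 := Svec_succ cs (2*k); have h2 := Svec_succ cs (2*k+1);
            have h3 : 2*(k+1) = 2*k+1+1 := by omega
            rw [h3]; omega)]
      have hsplit : List.range' (2*k) (2*(fuel+1)) = 2*k :: (2*k+1) :: List.range' (2*(k+1)) (2*fuel) := by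
        rw [show 2*(fuel+1) = (2*fuel+1)+1 from by omega, List.range'_succ, List.range'_succ,
          show 2*k+1+1 = 2*(k+1) from by omega]
      rw [hsplit]
      simp only [List.flatMap_cons]
      have hr0 : roundA cs (2*k) = ksAsc cs (2*k) := by
        unfold roundA
        rw [if_neg (by omega)]
      have hr1 : roundA cs (2*k+1) = (ksAsc cs (2*k+1)).reverse := by
        unfold roundA
        rw [if_pos (by omega)]
      rw [hr0, hr1]
      simp [List.append_assoc]

theorem flatMap_range_stable (cs : List Char) {M N : Nat}
    (h : ∀ j, j < 26 → gcnt cs j ≤ (M : Int)) (hMN : M ≤ N) :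
    (List.range N).flatMap (roundA cs) = (List.range M).flatMap (roundA cs) := by
  have step : ∀ K, M ≤ K → (List.range K).flatMap (roundA cs) = (List.range M).flatMap (roundA cs) := by
    intro K
    induction K with
    | zero => intro hK; rw [Nat.le_zero.mp hK]
    | succ K ihK =>
      intro hK
      rcases Nat.lt_or_ge M (K+1) with hlt | hge
      · have hMK : M ≤ K := by omega
        rw [List.range_succ, List.flatMap_append, ihK hMK]
        have : roundA cs K = [] := by
          unfold roundA
          rw [ksAsc_empty cs (fun j hj => le_trans (h j hj) (by exact_mod_cast hMK))]
          simp
        simp [this]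
      · have : M = K + 1 := by omega
        rw [this]
  exact step N hMN

theorem build_aux : ∀ (cs : List Char) (f : List Int),
    (∀ c ∈ cs, 97 ≤ c.toNat ∧ c.toNat ≤ 122) → f.length = 26 →
    cs.foldl (fun f c => PySem.List.pySetD f ((c.toNat : Int) - 97)
        (PySem.List.pyGetD f ((c.toNat : Int) - 97) 0 + 1)) f =
      (List.range 26).map (fun (j : Nat) => PySem.List.pyGetD f ((j : Nat) : Int) 0 + (cs.count (chrL j) : Int)) := by
  intro cs
  induction cs with
  | nil =>
    intro f _ h26
    apply List.ext_getElem
    · simp [h26]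
    · intro ii hh1 hh2
      simp only [List.foldl_nil, List.getElem_map, List.getElem_range]
      rw [PySem.List.pyGetD_eq_getElem f 0 (by positivity) (by simp at hh2; omega)]
      simp
  | cons c cs ih =>
    intro f hlc h26
    have hc := hlc c (List.mem_cons_self)
    have hidx0 : (0:Int) ≤ (c.toNat : Int) - 97 := by omega
    have hidx1 : (c.toNat : Int) - 97 < 26 := by omega
    simp only [List.foldl_cons]
    rw [ih _ (fun x hx => hlc x (List.mem_cons_of_mem _ hx))
      (by rw [PySem.List.length_pySetD]; exact h26)]
    apply List.map_congr_left
    intro j hj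
    simp only [List.mem_range] at hj
    by_cases hjc : j = c.toNat - 97
    · have hcast : ((j : Nat) : Int) = (c.toNat : Int) - 97 := by omega
      rw [hcast, pyGetD_pySetD_self f _ h26 hidx0 hidx1]
      have hcj : chrL j = c := by
        rw [eq_chrL hc.1 hc.2]
        rw [hjc]
      simp only [List.count_cons, beq_iff_eq]
      rw [if_pos hcj.symm]
      push_cast
      omega
    · have hne : ((j : Nat) : Int) ≠ (c.toNat : Int) - 97 := by omega
      rw [pyGetD_pySetD_ne f _ h26 hidx0 hidx1 (by omega) hne]
      have hcj : ¬ (c = chrL j) := by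
        intro he
        apply hjc
        have := chrL_toNat (j := j) (by omega)
        rw [← he] at this
        omega
      simp only [List.count_cons, beq_iff_eq]
      rw [if_neg hcj]
      push_cast
      omega

theorem build_eq (cs : List Char) (hlc : ∀ c ∈ cs, 97 ≤ c.toNat ∧ c.toNat ≤ 122) :
    cs.foldl (fun f c => PySem.List.pySetD f ((c.toNat : Int) - 97)
        (PySem.List.pyGetD f ((c.toNat : Int) - 97) 0 + 1)) (List.replicate 26 (0 : Int)) =
      clipvec cs 0 := by
  rw [build_aux cs _ hlc (by simp)]
  unfold clipvec
  apply List.map_congr_left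
  intro j hj
  simp only [List.mem_range] at hj
  have h0 : PySem.List.pyGetD (List.replicate 26 (0:Int)) ((j : Nat) : Int) 0 = 0 := by
    rw [PySem.List.pyGetD_eq_getElem _ 0 (by omega) (by simp; omega)]
    rw [List.getElem_replicate]
  rw [h0]
  have := gcnt_nonneg cs j
  unfold gcnt
  omega

theorem Svec_zero_eq_length (cs : List Char) (hlc : ∀ c ∈ cs, 97 ≤ c.toNat ∧ c.toNat ≤ 122) :
    Svec cs 0 = (cs.length : Int) := by
  have key : ∀ ds : List Char, (∀ c ∈ ds, 97 ≤ c.toNat ∧ c.toNat ≤ 122) →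
      ((List.range 26).map (fun j => (ds.count (chrL j) : Int))).sum = (ds.length : Int) := by
    intro ds
    induction ds with
    | nil => intro _; simp
    | cons c ds ih =>
      intro hl
      have hc := hl c (List.mem_cons_self)
      have hrest := ih (fun x hx => hl x (List.mem_cons_of_mem _ hx))
      have hsplit : ((List.range 26).map (fun j => ((c :: ds).count (chrL j) : Int))).sum =
          ((List.range 26).map (fun j => (ds.count (chrL j) : Int))).sum +
          ((List.range 26).map (fun j => if chrL j = c then (1:Int) else 0)).sum := by
        have : ∀ k : Nat, ((List.range k).map (fun j => ((c :: ds).count (chrL j) : Int))).sum =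
            ((List.range k).map (fun j => (ds.count (chrL j) : Int))).sum +
            ((List.range k).map (fun j => if chrL j = c then (1:Int) else 0)).sum := by
          intro k
          induction k with
          | zero => simp
          | succ k ihk =>
            rw [List.range_succ]
            simp only [List.map_append, List.sum_append]
            rw [ihk]
            simp only [List.map_cons, List.map_nil, List.sum_cons, List.sum_nil]
            simp only [List.count_cons, beq_iff_eq]
            by_cases he : c = chrL k
            · rw [if_pos he, if_pos he.symm]
              push_cast
              ring
            · rw [if_neg he, if_neg (fun h => he h.symm)]
              push_cast
              ring
        exact this 26
      have hone : ((List.range 26).map (fun j => if chrL j = c then (1:Int) else 0)).sum = 1 := by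
        have hcj : c = chrL (c.toNat - 97) := eq_chrL hc.1 hc.2
        have : ∀ k : Nat, k ≤ 26 → ((List.range k).map (fun j => if chrL j = c then (1:Int) else 0)).sum =
            if c.toNat - 97 < k then 1 else 0 := by
          intro k
          induction k with
          | zero => simp
          | succ k ihk =>
            intro hk
            rw [List.range_succ]
            simp only [List.map_append, List.sum_append, List.map_cons, List.map_nil,
              List.sum_cons, List.sum_nil]
            rw [ihk (by omega)]
            by_cases he : chrL k = c
            · have : k = c.toNat - 97 := by
                have h1 := chrL_toNat (j := k) (by omega)
                rw [he] at h1
                omega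
              rw [if_pos he]
              subst this
              simp
            · have hkne : ¬ (c.toNat - 97 = k) := by
                intro hh
                apply he
                rw [hcj, hh]
              rw [if_neg he]
              have : (c.toNat - 97 < k + 1) ↔ (c.toNat - 97 < k) := by omega
              rw [if_congr this (Eq.refl _) (Eq.refl _)]
              omega
        rw [this 26 (le_refl 26), if_pos (by omega)]
      rw [hsplit, hrest, hone]
      push_cast [List.length_cons]
      omega
  unfold Svec clipvec
  rw [← key cs hlc]
  apply congrArg
  apply List.map_congr_left
  intro j hj
  have := gcnt_nonneg cs j
  unfold gcnt
  omega

-- ===== B-side lemmas =====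

theorem ks_eq (cs : List Char) (hlc : ∀ c ∈ cs, 97 ≤ c.toNat ∧ c.toNat ≤ 122) (r : Nat) :
    PySem.List.sorted ((PySem.Dict.counter cs).keys.filter
        (fun c => decide ((r : Int) < (PySem.Dict.counter cs).getD c 0))) (fun c => c) false =
      ksAsc cs r := by
  apply PySem.List.sorted_eq_of_perm_of_pairwise_lt
  · -- permutation
    rw [List.perm_ext_iff_of_nodup]
    · intro c
      unfold ksAsc
      constructor
      · intro hc
        simp only [List.mem_map, List.mem_filter, List.mem_range] at hc
        obtain ⟨j, ⟨hj26, hjr⟩, rfl⟩ := hc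
        simp only [decide_eq_true_eq] at hjr
        have hmemcs : chrL j ∈ cs := by
          have : 0 < cs.count (chrL j) := by
            unfold gcnt at hjr
            omega
          exact List.count_pos_iff.mp this
        rw [List.mem_filter]
        constructor
        · rw [PySem.Dict.keys_counter, PySem.Set.mem_ofList]
          exact hmemcs
        · rw [PySem.Dict.getD_counter]
          simp only [decide_eq_true_eq]
          exact hjr
      · intro hc
        rw [List.mem_filter] at hc
        obtain ⟨hk, hp⟩ := hc
        rw [PySem.Dict.keys_counter, PySem.Set.mem_ofList] at hk
        rw [PySem.Dict.getD_counter] at hp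
        simp only [decide_eq_true_eq] at hp
        have hcl := hlc c hk
        simp only [List.mem_map, List.mem_filter, List.mem_range]
        refine ⟨c.toNat - 97, ⟨by omega, ?_⟩, (eq_chrL hcl.1 hcl.2).symm⟩
        simp only [decide_eq_true_eq]
        unfold gcnt
        rw [← eq_chrL hcl.1 hcl.2]
        exact hp
    · -- nodup ksAsc
      unfold ksAsc
      apply List.Nodup.map_on
      · intro j hj k hk he
        simp only [List.mem_filter, List.mem_range] at hj hk
        exact chrL_inj (by omega) (by omega) he
      · exact (List.nodup_range).filter _
    · exact (PySem.Dict.nodup_keys_counter cs).filter _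
  · -- pairwise <
    unfold ksAsc
    rw [List.pairwise_map]
    apply List.Pairwise.imp_of_mem ?_ ((List.pairwise_lt_range).filter _)
    intro a b ha hb hab
    simp only [List.mem_filter, List.mem_range] at ha hb
    exact chrL_lt (by omega) (by omega) hab

theorem A_main (cs : List Char) (n : Int) (hn : n = (cs.length : Int))
    (hlc : ∀ c ∈ cs, 97 ≤ c.toNat ∧ c.toNat ≤ 122) :
    loopA n (cs.length + 1) (clipvec cs 0) [] 0 =
      (List.range (2 * (cs.length + 1))).flatMap (roundA cs) := by
  have hb : ∀ j, j < 26 → gcnt cs j ≤ (2*0 + 2*(cs.length+1) : Int) := by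
    intro j hj
    unfold gcnt
    have := List.count_le_length (l := cs) (a := chrL j)
    push_cast
    omega
  have hS : Svec cs 0 = n := by rw [Svec_zero_eq_length cs hlc, hn]
  have h00 : (0 : Int) = n - Svec cs (2*0) := by simp [hS]
  calc loopA n (cs.length + 1) (clipvec cs 0) [] 0
      = loopA n (cs.length + 1) (clipvec cs (2*0)) [] (n - Svec cs (2*0)) := by
        rw [← h00]
    _ = [] ++ (List.range' (2*0) (2*(cs.length+1))).flatMap (roundA cs) := by
        apply loopA_eq cs n (cs.length+1) 0 []
        · intro j hj
          have := hb j hj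
          push_cast at *
          omega
        · rw [hS]
    _ = (List.range (2*(cs.length+1))).flatMap (roundA cs) := by
        rw [List.nil_append]
        congr 1
        rw [List.range_eq_range']

theorem B_main (cs : List Char) (hlc : ∀ c ∈ cs, 97 ≤ c.toNat ∧ c.toNat ≤ 122)
    (hne : cs ≠ []) :
    (let cnt := cs.foldl (fun d c => d.insert c (d.getD c 0 + 1)) PySem.Dict.empty
     let m : Int := ((PySem.List.max? cnt.values (fun v => v)).getD 0)
     ((PySem.List.pyRange 0 m 1).map (fun r =>
       let ks := PySem.List.sorted ((cnt.keys).filter (fun c => decide (r < cnt.getD c 0))) (fun c => c) false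
       if r % 2 == 1 then ks.reverse else ks)).flatten) =
      (List.range (2 * (cs.length + 1))).flatMap (roundA cs) := by
  simp only [PySem.Dict.foldl_insert_getD_add_one_eq_counter]
  -- the values list of Counter(cs)
  have hvals : (PySem.Dict.counter cs).values =
      (PySem.Set.ofList cs).map (fun k => (cs.count k : Int)) := by
    unfold PySem.Dict.values
    rw [PySem.Dict.items_counter]
    rw [List.map_map]
    simp [Function.comp]
  obtain ⟨c0, hc0⟩ : ∃ c0, c0 ∈ cs := List.exists_mem_of_ne_nil cs hne
  have hc0set : c0 ∈ PySem.Set.ofList cs := (PySem.Set.mem_ofList cs c0).mpr hc0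
  have hvne : (PySem.Dict.counter cs).values ≠ [] := by
    rw [hvals]
    intro hh
    rw [List.map_eq_nil_iff] at hh
    rw [hh] at hc0set
    simp at hc0set
  obtain ⟨mv, hmv⟩ : ∃ mv, PySem.List.max? ((PySem.Dict.counter cs).values) (fun v => v) = some mv := by
    rcases hh : PySem.List.max? ((PySem.Dict.counter cs).values) (fun v => v) with _ | mv
    · exact absurd ((PySem.List.max?_eq_none_iff _ _).mp hh) hvne
    · exact ⟨mv, rfl⟩
  have hmv_mem := PySem.List.max?_mem hmv
  have hmv_max := PySem.List.max?_isMax hmv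
  have hmv1 : 1 ≤ mv := by
    rw [hvals] at hmv_mem
    simp only [List.mem_map] at hmv_mem
    obtain ⟨c1, hc1, rfl⟩ := hmv_mem
    rw [PySem.Set.mem_ofList] at hc1
    have := List.count_pos_iff.mpr hc1
    omega
  have hmv_len : mv ≤ (cs.length : Int) := by
    rw [hvals] at hmv_mem
    simp only [List.mem_map] at hmv_mem
    obtain ⟨c1, _, rfl⟩ := hmv_mem
    have := List.count_le_length (l := cs) (a := c1)
    omega
  have hub : ∀ j, j < 26 → gcnt cs j ≤ (mv.toNat : Int) := by
    intro j hj
    rw [Int.toNat_of_nonneg (by omega)]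
    by_cases hmem : chrL j ∈ cs
    · apply hmv_max
      rw [hvals]
      simp only [List.mem_map]
      exact ⟨chrL j, (PySem.Set.mem_ofList cs (chrL j)).mpr hmem, rfl⟩
    · unfold gcnt
      rw [List.count_eq_zero_of_not_mem hmem]
      omega
  rw [hmv]
  simp only [Option.getD_some]
  have hrange : PySem.List.pyRange 0 mv 1 = (List.range mv.toNat).map Int.ofNat := by
    rw [PySem.List.pyRange_one]
    simp [Int.ofNat_eq_natCast]
  rw [hrange, List.map_map, ← List.flatMap_def]
  have hbody : ∀ rN ∈ List.range mv.toNat,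
      ((fun r =>
        if (r % 2 == 1) = true then
          (PySem.List.sorted ((PySem.Dict.counter cs).keys.filter
            (fun c => decide (r < (PySem.Dict.counter cs).getD c 0))) (fun c => c) false).reverse
        else
          PySem.List.sorted ((PySem.Dict.counter cs).keys.filter
            (fun c => decide (r < (PySem.Dict.counter cs).getD c 0))) (fun c => c) false) ∘ Int.ofNat) rN =
      roundA cs rN := by
    intro rN _
    simp only [Function.comp, Int.ofNat_eq_natCast]
    rw [ks_eq cs hlc rN]
    unfold roundA
    have hmod : (((rN : Int) % 2 == 1) = true) ↔ (rN % 2 = 1) := by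
      rw [beq_iff_eq]
      omega
    by_cases hpar : rN % 2 = 1
    · rw [if_pos (hmod.mpr hpar), if_pos hpar]
    · rw [if_neg (fun hh => hpar (hmod.mp hh)), if_neg hpar]
  exact (List.flatMap_congr hbody).trans
    (flatMap_range_stable cs (M := mv.toNat) (N := 2*(cs.length+1)) hub (by omega)).symm

-- ===== D_-side lemmas (A emits only lowercase; B keeps the input's chars) =====

theorem passA_chars (n : Int) : ∀ (order : List Int) (f : List Int) (res : List Char) (i : Int),
    ∀ c ∈ (passA n order (f, res, i)).2.1,
      c ∈ res ∨ ∃ j ∈ order, c = Char.ofNat (j + 97).toNat := by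
  intro order
  induction order with
  | nil =>
    intro f res i c hc
    exact Or.inl hc
  | cons j js ih =>
    intro f res i c hc
    simp only [passA] at hc
    by_cases hbr : i > n
    · rw [if_pos hbr] at hc
      exact Or.inl hc
    · rw [if_neg hbr] at hc
      by_cases hv : 0 < PySem.List.pyGetD f j 0
      · rw [if_pos hv] at hc
        rcases ih _ _ _ c hc with h | ⟨j', hj', he⟩
        · rcases List.mem_append.mp h with h | h
          · exact Or.inl h
          · exact Or.inr ⟨j, List.mem_cons_self, by simpa using h⟩
        · exact Or.inr ⟨j', List.mem_cons_of_mem _ hj', he⟩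
      · rw [if_neg hv] at hc
        rcases ih _ _ _ c hc with h | ⟨j', hj', he⟩
        · exact Or.inl h
        · exact Or.inr ⟨j', List.mem_cons_of_mem _ hj', he⟩

theorem loopA_chars (n : Int) : ∀ (fuel : Nat) (f : List Int) (res : List Char) (i : Int),
    ∀ c ∈ loopA n fuel f res i,
      c ∈ res ∨ ∃ j : Int, 0 ≤ j ∧ j < 26 ∧ c = Char.ofNat (j + 97).toNat := by
  intro fuel
  induction fuel with
  | zero =>
    intro f res i c hc
    exact Or.inl hc
  | succ fuel ih =>
    intro f res i c hc
    simp only [loopA] at hc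
    by_cases hcond : i < n
    · rw [if_pos hcond] at hc
      rcases hp1 : passA n (PySem.List.pyRange 0 26 1) (f, res, i) with ⟨f1, r1, i1⟩
      rw [hp1] at hc
      rcases hp2 : passA n (PySem.List.pyRange 25 (-1) (-1)) (f1, r1, i1) with ⟨f2, r2, i2⟩
      rw [hp2] at hc
      rcases ih f2 r2 i2 c hc with h2 | h2
      · have h1 := passA_chars n (PySem.List.pyRange 25 (-1) (-1)) f1 r1 i1 c (by rw [hp2]; exact h2)
        rcases h1 with h1 | ⟨j, hj, he⟩
        · have h0 := passA_chars n (PySem.List.pyRange 0 26 1) f res i c (by rw [hp1]; exact h1)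
          rcases h0 with h0 | ⟨j, hj, he⟩
          · exact Or.inl h0
          · rw [PySem.List.mem_pyRange_one] at hj
            exact Or.inr ⟨j, hj.1, hj.2, he⟩
        · rw [PySem.List.mem_pyRange_neg_one] at hj
          exact Or.inr ⟨j, by omega, by omega, he⟩
      · exact Or.inr h2
    · rw [if_neg hcond] at hc
      exact Or.inl hc

theorem B_contains (cs : List Char) (c₀ : Char) (hc : c₀ ∈ cs) :
    c₀ ∈ (let cnt := cs.foldl (fun d c => d.insert c (d.getD c 0 + 1)) PySem.Dict.empty
          let m : Int := ((PySem.List.max? cnt.values (fun v => v)).getD 0)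
          ((PySem.List.pyRange 0 m 1).map (fun r =>
            let ks := PySem.List.sorted ((cnt.keys).filter (fun c => decide (r < cnt.getD c 0))) (fun c => c) false
            if r % 2 == 1 then ks.reverse else ks)).flatten) := by
  simp only [PySem.Dict.foldl_insert_getD_add_one_eq_counter]
  have hvals : (PySem.Dict.counter cs).values =
      (PySem.Set.ofList cs).map (fun k => (cs.count k : Int)) := by
    unfold PySem.Dict.values
    rw [PySem.Dict.items_counter]
    rw [List.map_map]
    simp [Function.comp]
  have hc0set : c₀ ∈ PySem.Set.ofList cs := (PySem.Set.mem_ofList cs c₀).mpr hc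
  have hvne : (PySem.Dict.counter cs).values ≠ [] := by
    rw [hvals]
    intro hh
    rw [List.map_eq_nil_iff] at hh
    rw [hh] at hc0set
    simp at hc0set
  obtain ⟨mv, hmv⟩ : ∃ mv, PySem.List.max? ((PySem.Dict.counter cs).values) (fun v => v) = some mv := by
    rcases hh : PySem.List.max? ((PySem.Dict.counter cs).values) (fun v => v) with _ | mv
    · exact absurd ((PySem.List.max?_eq_none_iff _ _).mp hh) hvne
    · exact ⟨mv, rfl⟩
  have hmv_max := PySem.List.max?_isMax hmv
  have hcnt0 : 0 < cs.count c₀ := List.count_pos_iff.mpr hc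
  have hmv1 : 1 ≤ mv := by
    have : (cs.count c₀ : Int) ≤ mv := by
      apply hmv_max
      rw [hvals]
      simp only [List.mem_map]
      exact ⟨c₀, hc0set, rfl⟩
    omega
  rw [hmv]
  simp only [Option.getD_some]
  rw [List.mem_flatten]
  refine ⟨_, List.mem_map.mpr ⟨0, ?_, rfl⟩, ?_⟩
  · rw [PySem.List.mem_pyRange_one]
    omega
  · rw [if_neg (by simp)]
    rw [PySem.List.mem_sorted]
    rw [List.mem_filter]
    constructor
    · rw [PySem.Dict.keys_counter, PySem.Set.mem_ofList]
      exact hc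
    · simp only [PySem.Dict.getD_counter, decide_eq_true_eq]
      omega

theorem sortString1_spec : Claim_unchanged_sortString1 := by
  intro s _hdom hpre
  unfold Spec_sortString1
  intro hnd
  by_cases hlen : s.toList.length < 2
  · have hA : ((s.toList.length : Nat) : Int) < 2 := by exact_mod_cast hlen
    simp only [sortString1, sortString1_alt]
    rw [if_pos hA, if_pos hlen]
  · have hlen2 : 2 ≤ s.toList.length := by omega
    have hne : s.toList ≠ [] := by
      intro hh
      rw [hh] at hlen2
      simp at hlen2
    have hall : ∀ c ∈ s.toList, 71 ≤ c.toNat ∧ c.toNat ≤ 122 := by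
      rcases hpre with h | h
      · exact absurd h hlen
      · intro c' hc'
        have := List.all_eq_true.mp h c' hc'
        simpa using this
    have hallb : (s.toList.all (fun c => 71 ≤ c.toNat && c.toNat ≤ 122)) = true := by
      rcases hpre with h | h
      · exact absurd h hlen
      · exact h
    have hno : ∀ c ∈ s.toList, ¬ (c.toNat ≤ 96) := by
      intro c' hc' hle
      apply hnd
      refine ⟨hlen2, hallb, ?_⟩
      rw [List.any_eq_true]
      exact ⟨c', hc', by simpa using hle⟩
    have hlc : ∀ c ∈ s.toList, 97 ≤ c.toNat ∧ c.toNat ≤ 122 := by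
      intro c hcm
      have h1 := hall c hcm
      have h2 := hno c hcm
      omega
    have hAcond : ¬ (((s.toList.length : Nat) : Int) < 2) := by omega
    simp only [sortString1, sortString1_alt]
    rw [if_neg hAcond, if_neg hlen]
    apply congrArg String.ofList
    rw [build_eq s.toList hlc]
    rw [A_main s.toList ((s.toList.length : Nat) : Int) rfl hlc]
    exact (B_main s.toList hlc hne).symm

theorem sortString1_changed : Claim_changed_sortString1 := by
  unfold Claim_changed_sortString1
  exact ⟨by decide, by decide, by decide, by rfl, by rfl, by decide⟩

theorem sortString1_tight : Claim_exact_sortString1 := by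
  intro s _hdom _hpre hd heq
  obtain ⟨hlen2, _hall, hany⟩ := hd
  obtain ⟨c₀, hc₀mem, hc₀le⟩ := List.any_eq_true.mp hany
  have hc96 : c₀.toNat ≤ 96 := by simpa using hc₀le
  have hne : s.toList ≠ [] := by
    intro hh
    rw [hh] at hlen2
    simp at hlen2
  have hAcond : ¬ (((s.toList.length : Nat) : Int) < 2) := by omega
  have hBcond : ¬ (s.toList.length < 2) := by omega
  unfold sortString1 sortString1_alt at heq
  rw [if_neg hAcond, if_neg hBcond] at heq
  have hlists := congrArg String.toList heq
  rw [String.toList_ofList, String.toList_ofList] at hlists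
  have hBmem := B_contains s.toList c₀ hc₀mem
  rw [← hlists] at hBmem
  rcases loopA_chars _ _ _ _ _ c₀ hBmem with h0 | ⟨j, hj0, hj1, he⟩
  · simp at h0
  · have hnat : (j + 97).toNat = j.toNat + 97 := by omega
    have h2 := chrL_toNat (j := j.toNat) (by omega)
    unfold chrL at h2
    rw [he, hnat] at hc96
    rw [h2] at hc96
    omega
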